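-- pv_equiv track=rewrite | github.com/Project-DSA1/lab1 | Connect4.py | indexC
-- ===== SOURCE A (Python) =====
-- def indexC(s):
--     N = 0
--     r = 0
--     S = 0
--     C = 0
--     for c in s[::-1] :
--         if c == '1':
--             r += 1
--         if N==r:
--             C = 1
--         elif N<r:
--             C = 0
--         elif r==0:
--             C = 1
--         else :
--             C = C*N
--             if c == '1':
--                 C = C//r
--             else:
--                 C = C//(N-r)
--         if c=='1':
--             S += C
--         N += 1
--     return S
-- ===== SOURCE B (Python) =====
-- import math
--
-- def indexC(s):
--     S = 0
--     r = 0
--     for N, c in enumerate(reversed(s)):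
--         if c == '1':
--             r += 1
--             S += math.comb(N, r)
--     return S
-- ===== Notes on version B (the rewrite author's own statement) =====
-- stated objective: simpler
-- what changed: Drops the incrementally maintained binomial C and its four-case update/exact-division branch; B tracks only the count r of ones seen and adds math.comb(N, r) directly at each one-character.
import Mathlib
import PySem

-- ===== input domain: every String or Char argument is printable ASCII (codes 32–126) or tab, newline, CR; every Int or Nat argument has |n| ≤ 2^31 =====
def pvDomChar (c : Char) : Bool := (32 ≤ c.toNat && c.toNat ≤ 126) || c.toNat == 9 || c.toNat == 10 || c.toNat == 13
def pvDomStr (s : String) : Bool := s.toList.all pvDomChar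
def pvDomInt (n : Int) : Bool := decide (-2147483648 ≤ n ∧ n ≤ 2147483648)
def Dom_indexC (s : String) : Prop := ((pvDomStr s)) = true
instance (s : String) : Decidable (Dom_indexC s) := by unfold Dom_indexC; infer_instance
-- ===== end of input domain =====

-- B replaces A's incrementally-maintained binomial C (four-case branch with exact
-- integer divisions) by a direct Nat.choose at each '1'; objective: simpler.

-- ===== PORT A =====
-- one loop iteration of A: state (N, r, S, C)
def stepA (st : Int × Int × Int × Int) (c : Char) : Int × Int × Int × Int :=
  let N := st.1
  let r := if c = '1' then st.2.1 + 1 else st.2.1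
  let C :=
    if N = r then (1 : Int)
    else if N < r then 0
    else if r = 0 then 1
    else
      let C := st.2.2.2 * N
      if c = '1' then PySem.Int.floordiv C r else PySem.Int.floordiv C (N - r)
  let S := if c = '1' then st.2.2.1 + C else st.2.2.1
  (N + 1, r, S, C)

def indexC (s : String) : Int :=
  -- s[::-1]: step -1 never yields none
  let rev := (PySem.Str.slice? s none none (-1)).getD ""
  (rev.toList.foldl stepA (0, 0, 0, 0)).2.2.1

-- ===== PORT B =====
-- one loop iteration of B: state (S, r); math.comb(N, r) with N, r ≥ 0 is Nat.choose
def stepB (st : Int × Int) (p : Int × Char) : Int × Int :=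
  if p.2 = '1' then (st.1 + (Nat.choose p.1.toNat (st.2 + 1).toNat : Int), st.2 + 1)
  else st

def indexC_alt (s : String) : Int :=
  -- reversed(s) iterates the code points back to front
  ((PySem.List.enumerate s.toList.reverse 0).foldl stepB (0, 0)).1

-- ===== PRECONDITION & SPEC =====
def Spec_indexC (s : String) (out : Int) : Prop := out = indexC_alt s
instance (s : String) (out : Int) : Decidable (Spec_indexC s out) := by unfold Spec_indexC; infer_instance

-- ===== CLAIM (what is proved, stated in full; the proofs are below) =====
def Claim_equal_indexC : Prop := ∀ (s : String), Dom_indexC s → Spec_indexC s (indexC s)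

-- ===== LEMMAS AND PROOFS =====

-- A's maintained C entering an iteration at index N ≥ 1 is choose (N-1) r; under that
-- invariant both loops accumulate the same S.
lemma pv_loop_eq (l : List Char) : ∀ (N r : Nat) (S C : Int),
    (N = 0 ∨ C = (Nat.choose (N - 1) r : Int)) →
    (l.foldl stepA ((N : Int), (r : Int), S, C)).2.2.1
      = ((PySem.List.enumerate l (N : Int)).foldl stepB (S, (r : Int))).1 := by
  induction l with
  | nil => intro N r S C _; simp [PySem.List.enumerate]
  | cons c t ih =>
    intro N r S C hC
    rw [PySem.List.enumerate_cons, List.foldl_cons, List.foldl_cons]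
    by_cases h1 : c = '1'
    · -- the '1' case: new count r+1, A's new C must equal choose N (r+1)
      have hCn :
          (if (N : Int) = (r : Int) + 1 then (1 : Int)
           else if (N : Int) < (r : Int) + 1 then 0
           else if (r : Int) + 1 = 0 then 1
           else PySem.Int.floordiv (C * (N : Int)) ((r : Int) + 1))
            = (Nat.choose N (r + 1) : Int) := by
        split_ifs with hEq hLt hZ
        · have : N = r + 1 := by exact_mod_cast hEq
          simp [this, Nat.choose_self]
        · have : N < r + 1 := by exact_mod_cast hLt
          simp [Nat.choose_eq_zero_of_lt this]
        · omega
        · have hNgt : r + 1 < N := by omega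
          have hN1 : 1 ≤ N := by omega
          rcases hC with h0 | hCv
          · omega
          · have hid : N * Nat.choose (N - 1) r = Nat.choose N (r + 1) * (r + 1) := by
              have := Nat.add_one_mul_choose_eq (N - 1) r
              have hs : (N - 1) + 1 = N := by omega
              rw [hs] at this
              exact this
            have : C * (N : Int) = ((Nat.choose N (r + 1) * (r + 1) : Nat) : Int) := by
              rw [hCv]
              push_cast
              rw [mul_comm]
              exact_mod_cast congrArg (fun m : Nat => (m : Int)) hid
            rw [this]
            have hfd := PySem.Int.floordiv_natCast (Nat.choose N (r + 1) * (r + 1)) (r + 1)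
            rw [show ((r : Int) + 1) = ((r + 1 : Nat) : Int) by push_cast; ring, hfd,
              Nat.mul_div_cancel _ (by omega : 0 < r + 1)]
      simp only [stepA, stepB, h1, reduceIte]
      rw [hCn]
      have hrecast : ((r : Int) + 1) = ((r + 1 : Nat) : Int) := by push_cast; ring
      have hNcast : ((N : Int) + 1) = ((N + 1 : Nat) : Int) := by push_cast; ring
      have htoNat : ((N : Int)).toNat = N := Int.toNat_natCast N
      have hrtoNat : ((r : Int) + 1).toNat = r + 1 := by omega
      rw [htoNat, hrtoNat, hrecast, hNcast]
      exact ih (N + 1) (r + 1) _ _ (Or.inr (by simp))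
    · -- the non-'1' case: r unchanged, S unchanged; A's new C must equal choose N r
      have hCn :
          (if (N : Int) = (r : Int) then (1 : Int)
           else if (N : Int) < (r : Int) then 0
           else if (r : Int) = 0 then 1
           else PySem.Int.floordiv (C * (N : Int)) ((N : Int) - (r : Int)))
            = (Nat.choose N r : Int) := by
        split_ifs with hEq hLt hZ
        · have : N = r := by exact_mod_cast hEq
          simp [this, Nat.choose_self]
        · have : N < r := by exact_mod_cast hLt
          simp [Nat.choose_eq_zero_of_lt this]
        · have : r = 0 := by exact_mod_cast hZ
          simp [this]
        · have hNgt : r < N := by omega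
          rcases hC with h0 | hCv
          · omega
          · have hid : Nat.choose (N - 1) r * N = Nat.choose N r * (N - r) := by
              have := Nat.choose_mul_succ_eq (N - 1) r
              have hs : (N - 1) + 1 = N := by omega
              rw [hs] at this
              exact this
            have hcast : C * (N : Int) = ((Nat.choose N r * (N - r) : Nat) : Int) := by
              rw [hCv]
              exact_mod_cast congrArg (fun m : Nat => (m : Int)) hid
            rw [hcast]
            have hsub : ((N : Int) - (r : Int)) = ((N - r : Nat) : Int) := by omega
            rw [hsub, PySem.Int.floordiv_natCast,
              Nat.mul_div_cancel _ (by omega : 0 < N - r)]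
      simp only [stepA, stepB, h1, reduceIte]
      rw [hCn]
      have hNcast : ((N : Int) + 1) = ((N + 1 : Nat) : Int) := by push_cast; ring
      rw [hNcast]
      exact ih (N + 1) r _ _ (Or.inr (by simp))

-- ===== VERDICT (by name: the statement is the Claim_ definition above) =====
theorem indexC_spec : Claim_equal_indexC := by
  intro s _
  unfold Spec_indexC indexC indexC_alt
  rw [PySem.Str.slice?_none_none_neg_one]
  simp only [Option.getD_some]
  have h := pv_loop_eq s.toList.reverse 0 0 0 0 (Or.inl rfl)
  simpa using h
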